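-- pv_equiv track=rewrite | github.com/qwe12345678asd/MTACP | group_greedy.py | get_order_in_related_tasks
-- ===== SOURCE A (Python) =====
-- def get_order_in_related_tasks(dependency_graph, task):
-- 	visited = set()
-- 	dependent_tasks = []
--
-- 	def dfs(current_task):
-- 		visited.add(current_task)
-- 		dependent_tasks.append(current_task)  # 将当前任务添加到结果列表
-- 		for dependent_task in dependency_graph.get(current_task, []):
-- 			if dependent_task not in visited:
-- 				dfs(dependent_task)
--
-- 	dfs(task)
-- 	dependent_tasks.reverse()  # 反转结果列表
-- 	return dependent_tasks
-- ===== SOURCE B (Python) =====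
-- def get_order_in_related_tasks(dependency_graph, task):
--     visited = set()
--     result = []
--     stack = [task]
--     while stack:
--         node = stack.pop()
--         if node in visited:
--             continue
--         visited.add(node)
--         result.append(node)
--         # push neighbors reversed so they pop in their original order
--         stack.extend(reversed(dependency_graph.get(node, [])))
--     result.reverse()
--     return result
-- ===== Notes on version B (the rewrite author's own statement) =====
-- stated objective: alternative
-- what changed: A's recursive nested-function DFS is replaced by an explicit stack-based iterative DFS (pop a node, mark/append at pop time, push its neighbors reversed so they pop in original order), producing the identical preorder-then-reversed list without recursion.
import Mathlib
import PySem

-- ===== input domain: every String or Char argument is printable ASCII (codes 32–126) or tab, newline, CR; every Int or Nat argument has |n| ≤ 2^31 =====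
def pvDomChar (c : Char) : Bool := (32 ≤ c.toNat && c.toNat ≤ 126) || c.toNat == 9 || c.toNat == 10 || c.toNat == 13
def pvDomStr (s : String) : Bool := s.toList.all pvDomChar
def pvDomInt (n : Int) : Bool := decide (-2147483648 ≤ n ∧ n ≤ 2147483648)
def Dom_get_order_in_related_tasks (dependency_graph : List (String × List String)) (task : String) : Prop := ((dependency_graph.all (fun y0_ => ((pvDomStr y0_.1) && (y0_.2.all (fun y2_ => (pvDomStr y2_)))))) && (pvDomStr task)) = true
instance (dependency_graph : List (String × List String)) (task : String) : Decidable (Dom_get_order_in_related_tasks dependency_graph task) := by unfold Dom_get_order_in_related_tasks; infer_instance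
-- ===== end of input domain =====

-- B replaces A's recursive DFS by an explicit stack-based iterative DFS (same return value; objective: alternative decomposition).

-- shared helper: dependency_graph.get(k, []) — first-match association-list lookup (Python dict keys are unique)
def pvGetD (g : List (String × List String)) (k : String) : List String :=
  match g with
  | [] => []
  | (k', v) :: rest => if k' == k then v else pvGetD rest k

-- ===== PORT A =====
-- the recursive dfs; the Nat argument is a totality fuel only (the callers pass a fuel
-- proved sufficient below, so the 0 branch is never reached on any input)
def pvDfsA (g : List (String × List String)) : Nat → PySem.Set String → List String → String → PySem.Set String × List String
  | 0, v, a, _ => (v, a)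
  | f+1, v, a, c =>
    -- visited.add(current); dependent_tasks.append(current); for d in graph.get(current, []): if d not in visited: dfs(d)
    (pvGetD g c).foldl
      (fun st d => if PySem.Set.contains st.1 d then st else pvDfsA g f st.1 st.2 d)
      (PySem.Set.add v c, a ++ [c])

def get_order_in_related_tasks (dependency_graph : List (String × List String)) (task : String) : List String :=
  ((pvDfsA dependency_graph ((dependency_graph.flatMap Prod.snd).length + 2) PySem.Set.empty [] task).2).reverse

-- ===== PORT B =====
-- the while-stack loop of Source B. The Lean list models the Python stack with head = top
-- (Python appends/pops at the END): 'stack.extend(reversed(deps)); stack.pop()' pops deps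
-- in original order, i.e. the new head-top stack is 'deps ++ stack'.
-- The Nat argument is a totality fuel only (one unit per newly visited node; the caller's
-- fuel is proved sufficient below, so the 0 branch is never reached on any input).
def pvLoopB (g : List (String × List String)) : Nat → List String → PySem.Set String → List String → List String
  | _, [], _, r => r.reverse
  | 0, _ :: _, _, r => r.reverse
  | f+1, x :: s, v, r =>
    if PySem.Set.contains v x then pvLoopB g (f+1) s v r
    else pvLoopB g f (pvGetD g x ++ s) (PySem.Set.add v x) (r ++ [x])
  termination_by f st _ _ => (f, st.length)

def get_order_in_related_tasks_alt (dependency_graph : List (String × List String)) (task : String) : List String :=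
  pvLoopB dependency_graph ((dependency_graph.flatMap Prod.snd).length + 2) [task] PySem.Set.empty []

-- ===== PRECONDITION & SPEC =====
def Spec_get_order_in_related_tasks (dependency_graph : List (String × List String)) (task : String) (out : List String) : Prop := out = get_order_in_related_tasks_alt dependency_graph task
instance (dependency_graph : List (String × List String)) (task : String) (out : List String) : Decidable (Spec_get_order_in_related_tasks dependency_graph task out) := by unfold Spec_get_order_in_related_tasks; infer_instance

-- ===== CLAIM (what is proved, stated in full; the proofs are below) =====
def Claim_equal_get_order_in_related_tasks : Prop := ∀ (dependency_graph : List (String × List String)) (task : String), Dom_get_order_in_related_tasks dependency_graph task → Spec_get_order_in_related_tasks dependency_graph task (get_order_in_related_tasks dependency_graph task)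

-- ===== LEMMAS AND PROOFS =====

-- the loop body of A's dfs, and the fold of A's dfs over a list of candidate nodes
def pvStep (g : List (String × List String)) (f : Nat) (st : PySem.Set String × List String) (d : String) : PySem.Set String × List String :=
  if PySem.Set.contains st.1 d then st else pvDfsA g f st.1 st.2 d

def pvDfsAs (g : List (String × List String)) (f : Nat) (v : PySem.Set String) (a : List String) (xs : List String) : PySem.Set String × List String :=
  xs.foldl (pvStep g f) (v, a)

lemma pvDfsA_succ (g : List (String × List String)) (f : Nat) (v : PySem.Set String) (a : List String) (c : String) :
    pvDfsA g (f+1) v a c = pvDfsAs g f (PySem.Set.add v c) (a ++ [c]) (pvGetD g c) := rfl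

-- number of U0-nodes not yet visited
def pvU (U0 : List String) (v : PySem.Set String) : Nat :=
  ((U0.dedup).filter (fun x => !(PySem.Set.contains v x))).length


-- contains / add facts
lemma pvContains_true (v : PySem.Set String) (x : String) (h : x ∈ v) : PySem.Set.contains v x = true := by
  simp [h]

lemma pvContains_false (v : PySem.Set String) (x : String) (h : x ∉ v) : PySem.Set.contains v x = false := by
  simp [h]

lemma pvContains_add_ne (v : PySem.Set String) (x c : String) (h : x ≠ c) :
    PySem.Set.contains (PySem.Set.add v c) x = PySem.Set.contains v x := by
  by_cases hv : x ∈ v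
  · simp [hv, PySem.Set.mem_add]
  · simp [hv, PySem.Set.mem_add, h]

-- the visited set only grows
lemma pvMem_foldl_step (g : List (String × List String)) (f : Nat)
    (H : ∀ (v : PySem.Set String) (a : List String) (c x : String), x ∈ v → x ∈ (pvDfsA g f v a c).1) :
    ∀ (xs : List String) (st : PySem.Set String × List String) (x : String),
      x ∈ st.1 → x ∈ (xs.foldl (pvStep g f) st).1 := by
  intro xs
  induction xs with
  | nil => intro st x hx; simpa using hx
  | cons d ds ih =>
    intro st x hx
    simp only [List.foldl_cons]
    apply ih
    unfold pvStep
    split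
    · exact hx
    · exact H _ _ _ _ hx

lemma pvMem_dfsA (g : List (String × List String)) :
    ∀ (f : Nat) (v : PySem.Set String) (a : List String) (c x : String), x ∈ v → x ∈ (pvDfsA g f v a c).1 := by
  intro f
  induction f with
  | zero => intro v a c x hx; simpa [pvDfsA] using hx
  | succ f ih =>
    intro v a c x hx
    rw [pvDfsA_succ]
    exact pvMem_foldl_step g f ih _ _ _ ((PySem.Set.mem_add _ _ _).mpr (Or.inl hx))

lemma pvMem_dfsAs (g : List (String × List String)) (f : Nat) (v : PySem.Set String) (a : List String)
    (xs : List String) (x : String) (hx : x ∈ v) : x ∈ (pvDfsAs g f v a xs).1 :=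
  pvMem_foldl_step g f (pvMem_dfsA g f) xs (v, a) x hx

-- counting lemmas for the unvisited measure
lemma pvFilter_len_mono : ∀ (l : List String) (p q : String → Bool),
    (∀ x, q x = true → p x = true) → (l.filter q).length ≤ (l.filter p).length := by
  intro l p q h
  induction l with
  | nil => simp
  | cons x t ih =>
    by_cases hq : q x = true
    · simp [hq, h x hq]; omega
    · have hq' : q x = false := by simpa using hq
      cases hp : p x <;> simp [hq', hp] <;> omega

lemma pvU_mono (U0 : List String) (v w : PySem.Set String) (h : ∀ x, x ∈ v → x ∈ w) :
    pvU U0 w ≤ pvU U0 v := by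
  apply pvFilter_len_mono
  intro x hx
  have hw : x ∉ w := by simpa [← Bool.not_eq_true, PySem.Set.contains_iff] using hx
  have hv : x ∉ v := fun hxv => hw (h x hxv)
  simpa [← Bool.not_eq_true, PySem.Set.contains_iff] using hv

lemma pvFilter_flip_len : ∀ (l : List String), l.Nodup → ∀ (p q : String → Bool) (c : String),
    c ∈ l → p c = true → q c = false → (∀ x, x ≠ c → q x = p x) →
    (l.filter q).length + 1 = (l.filter p).length := by
  intro l
  induction l with
  | nil => intro _ p q c hc; simp at hc
  | cons y t ih =>
    intro hnd p q c hc hp hq hxc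
    rcases List.nodup_cons.mp hnd with ⟨hy, hndt⟩
    rcases List.mem_cons.mp hc with hc | hc
    · subst hc
      have ht : t.filter q = t.filter p := by
        apply List.filter_congr
        intro x hx
        exact hxc x (fun hxy => hy (hxy ▸ hx))
      simp [hp, hq, ht]
    · by_cases hyc : y = c
      · exact absurd (hyc ▸ hc) hy
      · have hrec := ih hndt p q c hc hp hq hxc
        have hqy : q y = p y := hxc y hyc
        cases hpy : p y <;> simp [hpy, hqy] <;> omega

lemma pvU_add (U0 : List String) (v : PySem.Set String) (c : String) (hc : c ∈ U0) (hv : c ∉ v) :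
    pvU U0 (PySem.Set.add v c) + 1 = pvU U0 v := by
  apply pvFilter_flip_len _ (List.nodup_dedup U0) _ _ c (List.mem_dedup.mpr hc)
  · rw [pvContains_false v c hv]; rfl
  · rw [pvContains_true _ c ((PySem.Set.mem_add _ _ _).mpr (Or.inr rfl))]; rfl
  · intro x hx; rw [pvContains_add_ne v x c hx]

-- values produced by pvGetD are neighbor lists
lemma pvGetD_subset_flatMap (g : List (String × List String)) (d x : String)
    (hx : x ∈ pvGetD g d) : x ∈ g.flatMap Prod.snd := by
  induction g with
  | nil => simp [pvGetD] at hx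
  | cons p rest ih =>
    rw [pvGetD] at hx
    simp only [List.flatMap_cons, List.mem_append]
    by_cases h : p.1 == d
    · left; simpa [h] using hx
    · right; exact ih (by simpa [h] using hx)

-- one-step equations for the two loops
lemma pvLoopB_nil (g : List (String × List String)) (f : Nat) (v : PySem.Set String) (r : List String) :
    pvLoopB g f [] v r = r.reverse := by
  cases f <;> rw [pvLoopB]

lemma pvLoopB_cons (g : List (String × List String)) (f : Nat) (x : String) (s : List String)
    (v : PySem.Set String) (r : List String) :
    pvLoopB g (f+1) (x :: s) v r =
      if PySem.Set.contains v x then pvLoopB g (f+1) s v r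
      else pvLoopB g f (pvGetD g x ++ s) (PySem.Set.add v x) (r ++ [x]) := by
  rw [pvLoopB]

lemma pvDfsAs_cons (g : List (String × List String)) (f : Nat) (v : PySem.Set String)
    (a : List String) (d : String) (ds : List String) :
    pvDfsAs g f v a (d :: ds) = pvDfsAs g f (pvStep g f (v, a) d).1 (pvStep g f (v, a) d).2 ds := by
  simp [pvDfsAs, List.foldl_cons]

-- MAIN LEMMA: running B's loop through a pending list xs equals folding A's dfs over xs,
-- fuel decreasing exactly by the number of newly visited nodes
lemma pvLoop_eq_dfs (g : List (String × List String)) (U0 : List String)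
    (hU : ∀ d x, x ∈ pvGetD g d → x ∈ U0) :
    ∀ (n : Nat) (v : PySem.Set String), pvU U0 v = n →
    ∀ (xs : List String), (∀ x ∈ xs, x ∈ U0) →
    ∀ (a s : List String) (f₁ f₂ : Nat), n < f₁ → n < f₂ →
    pvLoopB g f₂ (xs ++ s) v a =
      pvLoopB g (f₂ - (n - pvU U0 (pvDfsAs g f₁ v a xs).1)) s
        (pvDfsAs g f₁ v a xs).1 (pvDfsAs g f₁ v a xs).2 := by
  intro n
  induction n using Nat.strong_induction_on with
  | _ n IH =>
    intro v hv xs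
    induction xs with
    | nil =>
      intro _ a s f₁ f₂ _ _
      simp [pvDfsAs, hv]
    | cons d ds ihxs =>
      intro hxs a s f₁ f₂ hf₁ hf₂
      obtain ⟨k, rfl⟩ : ∃ k, f₂ = k + 1 := ⟨f₂ - 1, by omega⟩
      rw [List.cons_append, pvLoopB_cons]
      rcases Bool.eq_false_or_eq_true (PySem.Set.contains v d) with hc | hc
      · -- d already visited: B skips it, A's fold skips it
        rw [hc, if_pos rfl]
        have hstep : pvStep g f₁ (v, a) d = (v, a) := by
          rw [pvStep]
          rw [show ((v, a) : PySem.Set String × List String).1 = v from rfl, hc]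
          rw [if_pos rfl]
        rw [pvDfsAs_cons, hstep]
        exact ihxs (fun x hx => hxs x (List.mem_cons_of_mem d hx)) a s f₁ (k+1) hf₁ hf₂
      · -- d not yet visited: one real step on both sides
        rw [hc, if_neg (by simp)]
        have hdU0 : d ∈ U0 := hxs d (List.mem_cons_self)
        have hdv : d ∉ v := by simpa using hc
        have hn₁ : pvU U0 (PySem.Set.add v d) + 1 = n := by
          rw [← hv]; exact pvU_add U0 v d hdU0 hdv
        obtain ⟨m, rfl⟩ : ∃ m, f₁ = m + 1 := ⟨f₁ - 1, by omega⟩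
        have step1 := IH (pvU U0 (PySem.Set.add v d)) (by omega) (PySem.Set.add v d) rfl
          (pvGetD g d) (fun x hx => hU d x hx) (a ++ [d]) (ds ++ s) m k (by omega) (by omega)
        rw [step1]
        set Q := pvDfsAs g m (PySem.Set.add v d) (a ++ [d]) (pvGetD g d) with hQ
        have hn₂ : pvU U0 Q.1 ≤ pvU U0 (PySem.Set.add v d) := by
          apply pvU_mono
          intro x hx
          exact pvMem_dfsAs g m (PySem.Set.add v d) (a ++ [d]) (pvGetD g d) x hx
        have step2 := IH (pvU U0 Q.1) (by omega) Q.1 rfl ds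
          (fun x hx => hxs x (List.mem_cons_of_mem d hx)) Q.2 s (m+1)
          (k - (pvU U0 (PySem.Set.add v d) - pvU U0 Q.1)) (by omega) (by omega)
        rw [step2]
        set R := pvDfsAs g (m+1) Q.1 Q.2 ds with hR
        have hQR : pvDfsAs g (m+1) v a (d :: ds) = R := by
          rw [pvDfsAs_cons]
          have hstep : pvStep g (m+1) (v, a) d = Q := by
            rw [pvStep]
            rw [show ((v, a) : PySem.Set String × List String).1 = v from rfl, hc]
            rw [if_neg (by simp)]
            rw [pvDfsA_succ]
          rw [hstep]
        have hu : pvU U0 R.1 ≤ pvU U0 Q.1 := by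
          apply pvU_mono
          intro x hx
          exact pvMem_dfsAs g (m+1) Q.1 Q.2 ds x hx
        rw [hQR]
        congr 1
        omega

theorem get_order_in_related_tasks_spec : Claim_equal_get_order_in_related_tasks := by
  intro g task _
  unfold Spec_get_order_in_related_tasks get_order_in_related_tasks get_order_in_related_tasks_alt
  have hU : ∀ d x, x ∈ pvGetD g d → x ∈ task :: g.flatMap Prod.snd := by
    intro d x hx
    exact List.mem_cons_of_mem _ (pvGetD_subset_flatMap g d x hx)
  have hn : pvU (task :: g.flatMap Prod.snd) PySem.Set.empty < (g.flatMap Prod.snd).length + 2 := by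
    have h1 : pvU (task :: g.flatMap Prod.snd) PySem.Set.empty ≤ (task :: g.flatMap Prod.snd).length := by
      unfold pvU
      calc ((task :: g.flatMap Prod.snd).dedup.filter _).length
          ≤ (task :: g.flatMap Prod.snd).dedup.length := List.length_filter_le _ _
        _ ≤ (task :: g.flatMap Prod.snd).length := (List.dedup_sublist _).length_le
    simp only [List.length_cons] at h1
    omega
  have main := pvLoop_eq_dfs g (task :: g.flatMap Prod.snd) hU
    (pvU (task :: g.flatMap Prod.snd) PySem.Set.empty) PySem.Set.empty rfl
    [task] (by intro x hx; rw [List.mem_singleton] at hx; exact hx ▸ List.mem_cons_self)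
    [] [] ((g.flatMap Prod.snd).length + 2) ((g.flatMap Prod.snd).length + 2) hn hn
  have hP : pvDfsAs g ((g.flatMap Prod.snd).length + 2) PySem.Set.empty [] [task]
      = pvDfsA g ((g.flatMap Prod.snd).length + 2) PySem.Set.empty [] task := by
    simp [pvDfsAs, pvStep, PySem.Set.empty]
  rw [List.singleton_append, pvLoopB_nil, hP] at main
  rw [main]
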